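-- pv_equiv track=rewrite | github.com/KishanSeksaria/CSCI-561---Foundations-of-AI | hw1/homework.py | bfs
-- ===== SOURCE A (Python) =====
-- def bfs(safeLocations, safePaths, energyLimit):
--   queue = [(0, "start", ["start"], 0)]
--   visited = set()
--
--   while queue:
--     cost, current, path, momentum = queue.pop(0)
--
--     if current == "goal":
--       return path
--     if current in safePaths:
--       neighbors = safePaths[current]
--     else:
--       neighbors = []
--
--     for neighbor in neighbors:
--       required_energy = safeLocations[neighbor][2] - safeLocations[current][2]
--       if energyLimit + momentum >= required_energy:
--         new_cost = cost + 1
--         new_momentum = max(-required_energy, 0)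
--         if (current, neighbor) not in visited:
--           visited.add((current, neighbor))
--           queue.append((new_cost, neighbor, path + [neighbor], new_momentum))
--
--   # if no path is found, return "FAIL"
--   return ["FAIL"]
-- ===== SOURCE B (Python) =====
-- def bfs(safeLocations, safePaths, energyLimit):
--   # Two-stack FIFO queue + parent-pointer (back-pointer) path reconstruction:
--   # no per-entry path copies, the path is rebuilt only when "goal" is popped.
--   states = [("start", -1)]          # (node, parent index into states); -1 = root
--   front = [(0, "start", 0, 0)]      # next entry to serve sits at front[-1]
--   back = []                         # new entries are appended here
--   visited = set()
--
--   while front or back: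
--     if not front:
--       front = back[::-1]
--       back = []
--     cost, current, si, momentum = front.pop()
--
--     if current == "goal":
--       path = []
--       i = si
--       while i != -1:
--         node, i = states[i]
--         path.insert(0, node)
--       return path
--
--     for neighbor in safePaths.get(current, []):
--       required_energy = safeLocations[neighbor][2] - safeLocations[current][2]
--       if energyLimit + momentum >= required_energy and (current, neighbor) not in visited:
--         visited.add((current, neighbor))
--         idx = len(states)
--         states.append((neighbor, si))
--         back.append((cost + 1, neighbor, idx, max(-required_energy, 0)))
--
--   return ["FAIL"]
-- ===== Notes on version B (the rewrite author's own statement) =====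
-- stated objective: alternative
-- what changed: B replaces A's single list-queue of full path copies by a two-stack FIFO queue whose entries carry only a parent-pointer index into a state table, expands neighbors with an explicit recursive push onto the back stack, and rebuilds the path by walking parent pointers (prepending) only when the goal is popped.
import Mathlib
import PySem

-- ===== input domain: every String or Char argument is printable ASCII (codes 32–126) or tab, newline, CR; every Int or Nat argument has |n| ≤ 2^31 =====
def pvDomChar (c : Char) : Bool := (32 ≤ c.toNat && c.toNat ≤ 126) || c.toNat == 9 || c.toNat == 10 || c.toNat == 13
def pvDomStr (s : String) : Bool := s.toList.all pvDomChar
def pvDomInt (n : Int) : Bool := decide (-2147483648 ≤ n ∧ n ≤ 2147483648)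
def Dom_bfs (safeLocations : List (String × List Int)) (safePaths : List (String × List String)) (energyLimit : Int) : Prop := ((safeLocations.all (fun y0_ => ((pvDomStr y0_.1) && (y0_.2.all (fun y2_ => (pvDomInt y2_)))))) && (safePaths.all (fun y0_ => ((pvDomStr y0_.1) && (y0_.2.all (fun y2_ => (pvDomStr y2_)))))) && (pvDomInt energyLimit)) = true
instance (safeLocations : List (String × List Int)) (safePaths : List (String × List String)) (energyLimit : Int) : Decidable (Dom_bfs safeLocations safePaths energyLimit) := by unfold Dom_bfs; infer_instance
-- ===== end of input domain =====

-- B replaces A's path-copying list-queue BFS by a two-stack FIFO queue over back-pointer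
-- state records (path rebuilt only when "goal" is popped); return values proved equal on Pre_.

-- shared helpers: first-match dict lookup, `safeLocations[k][2]` (the `.getD` defaults
-- never fire on Pre_ inputs, where every needed key is present with ≥ 3 coordinates),
-- and the loop fuel bound: each iteration pops one queue entry and every push adds a
-- fresh edge to `visited`, so iterations ≤ (total listed edges) + 1 and the fuel below
-- is never exhausted while the queue is nonempty
def pvLookup {α : Type} (xs : List (String × α)) (k : String) : Option α :=
  (xs.find? (fun p => p.1 == k)).map (·.2)

def pvLoc2 (locs : List (String × List Int)) (k : String) : Int :=
  (PySem.List.pyGet? ((pvLookup locs k).getD []) 2).getD 0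

def pvFuel (safePaths : List (String × List String)) : Nat :=
  (safePaths.map (fun p => p.2.length)).sum + 1

-- ===== PORT A =====
def bfsLoopA (locs : List (String × List Int)) (paths : List (String × List String)) (eL : Int) :
    Nat → List (Int × String × List String × Int) → PySem.Set (String × String) → List String
  | 0, _, _ => ["FAIL"]
  | _ + 1, [], _ => ["FAIL"]
  | fuel + 1, (cost, current, path, momentum) :: rest, visited =>
    if current = "goal" then path
    else
      let neighbors := (pvLookup paths current).getD []
      let st := neighbors.foldl (fun acc neighbor =>
        let required := pvLoc2 locs neighbor - pvLoc2 locs current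
        if eL + momentum ≥ required then
          if PySem.Set.contains acc.2 (current, neighbor) then acc
          else (acc.1 ++ [(cost + 1, neighbor, path ++ [neighbor], max (-required) 0)],
                PySem.Set.add acc.2 (current, neighbor))
        else acc) (rest, visited)
      bfsLoopA locs paths eL fuel st.1 st.2

def bfs (safeLocations : List (String × List Int)) (safePaths : List (String × List String)) (energyLimit : Int) : List String :=
  bfsLoopA safeLocations safePaths energyLimit (pvFuel safePaths)
    [(0, "start", ["start"], 0)] PySem.Set.empty

-- ===== PORT B =====
-- `while i != -1: node, i = states[i]; path.insert(0, node)` — prepend while walking up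
def pvWalk2 (states : List (String × Int)) : Nat → Int → List String → List String
  | 0, _, path => path
  | f + 1, i, path =>
    if i = -1 then path
    else
      match PySem.List.pyGet? states i with
      | some (node, parent) => pvWalk2 states f parent (node :: path)
      | none => path

-- the `for neighbor in safePaths.get(current, [])` body: pushes onto the BACK stack,
-- appends a state record, marks the edge visited
def pvExpand (locs : List (String × List Int)) (eL cost momentum : Int) (current : String) (si : Int) :
    List String → List (Int × String × Int × Int) → List (String × Int) →
    PySem.Set (String × String) →
    List (Int × String × Int × Int) × List (String × Int) × PySem.Set (String × String)
  | [], back, states, visited => (back, states, visited)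
  | n :: ns, back, states, visited =>
    let required := pvLoc2 locs n - pvLoc2 locs current
    if eL + momentum ≥ required ∧ PySem.Set.contains visited (current, n) = false then
      pvExpand locs eL cost momentum current si ns
        (back ++ [(cost + 1, n, (states.length : Int), max (-required) 0)])
        (states ++ [(n, si)])
        (PySem.Set.add visited (current, n))
    else
      pvExpand locs eL cost momentum current si ns back states visited

def bfsLoopB (locs : List (String × List Int)) (paths : List (String × List String)) (eL : Int) :
    Nat → List (Int × String × Int × Int) → List (Int × String × Int × Int) →
    List (String × Int) → PySem.Set (String × String) → List String
  | 0, _, _, _, _ => ["FAIL"]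
  | fuel + 1, front0, back0, states, visited =>
    let fb := if front0.isEmpty then (back0.reverse, ([] : List (Int × String × Int × Int)))
              else (front0, back0)
    match fb.1.getLast? with
    | none => ["FAIL"]
    | some (cost, current, si, momentum) =>
      if current = "goal" then pvWalk2 states states.length si []
      else
        let st := pvExpand locs eL cost momentum current si
          ((pvLookup paths current).getD []) fb.2 states visited
        bfsLoopB locs paths eL fuel fb.1.dropLast st.1 st.2.1 st.2.2

def bfs_alt (safeLocations : List (String × List Int)) (safePaths : List (String × List String)) (energyLimit : Int) : List String :=
  bfsLoopB safeLocations safePaths energyLimit (pvFuel safePaths)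
    [(0, "start", 0, 0)] [] [("start", -1)] PySem.Set.empty

-- ===== PRECONDITION & SPEC =====
-- Pre_ excludes (a) inputs where "start" has listed neighbors and some listed edge
-- endpoint has no safeLocations entry of length ≥ 3 — Python A raises KeyError/IndexError
-- when such an edge is reached (when the bad edge is unreachable A returns normally;
-- those inputs are excluded too, a stated narrowing of this closed-form key-consistency
-- condition), and (b) duplicate keys in either dict argument, where Python's last-wins
-- dict construction and the assoc-list first-match convention legitimately disagree.
def pvKeyOK (locs : List (String × List Int)) (k : String) : Prop :=
  ∃ q ∈ locs, q.1 = k ∧ 3 ≤ q.2.length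

def Pre_bfs (safeLocations : List (String × List Int)) (safePaths : List (String × List String)) (energyLimit : Int) : Prop :=
  (safeLocations.map (·.1)).Nodup ∧ (safePaths.map (·.1)).Nodup ∧
  (((safePaths.find? (fun p => p.1 == "start")).map (·.2)).getD [] = [] ∨
   ∀ p ∈ safePaths, ∀ n ∈ p.2, pvKeyOK safeLocations p.1 ∧ pvKeyOK safeLocations n)

instance (safeLocations : List (String × List Int)) (safePaths : List (String × List String)) (energyLimit : Int) : Decidable (Pre_bfs safeLocations safePaths energyLimit) := by
  unfold Pre_bfs pvKeyOK; infer_instance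

def pvWitness_bfs : (List (String × List Int)) × (List (String × List String)) × Int :=
  ([("start", [0, 0, 0]), ("goal", [1, 1, 1])], [("start", ["goal"])], 2)

def Spec_bfs (safeLocations : List (String × List Int)) (safePaths : List (String × List String)) (energyLimit : Int) (out : List String) : Prop := out = bfs_alt safeLocations safePaths energyLimit
instance (safeLocations : List (String × List Int)) (safePaths : List (String × List String)) (energyLimit : Int) (out : List String) : Decidable (Spec_bfs safeLocations safePaths energyLimit out) := by unfold Spec_bfs; infer_instance

-- ===== CLAIM (what is proved, stated in full; the proofs are below) =====
def Claim_equal_bfs : Prop := ∀ (safeLocations : List (String × List Int)) (safePaths : List (String × List String)) (energyLimit : Int), Dom_bfs safeLocations safePaths energyLimit → Pre_bfs safeLocations safePaths energyLimit → Spec_bfs safeLocations safePaths energyLimit (bfs safeLocations safePaths energyLimit)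

-- ===== LEMMAS AND PROOFS =====

-- states-array invariant: every parent pointer is -1 or a strictly smaller valid index
def StInv (states : List (String × Int)) : Prop :=
  ∀ j : Nat, ∀ h : j < states.length, -1 ≤ (states[j]'h).2 ∧ (states[j]'h).2 < (j : Int)

def GoodIdx (states : List (String × Int)) (i : Int) : Prop :=
  0 ≤ i ∧ i < (states.length : Int)

-- the path a state index denotes, and the A-queue a B-queue denotes
def pathOf (states : List (String × Int)) (i : Int) : List String :=
  pvWalk2 states states.length i []

def mapQ (states : List (String × Int)) (qB : List (Int × String × Int × Int)) :
    List (Int × String × List String × Int) :=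
  qB.map (fun e => (e.1, e.2.1, pathOf states e.2.2.1, e.2.2.2))

theorem pyGet?_pos (xs : List (String × Int)) (i : Int) (h0 : 0 ≤ i) (h1 : i < (xs.length : Int)) :
    PySem.List.pyGet? xs i = xs[i.toNat]? := by
  simp [PySem.List.pyGet?, PySem.List.pyIdx?, h0, h1]

theorem pvWalk2_neg_one (s : List (String × Int)) (f : Nat) (acc : List String) :
    pvWalk2 s f (-1) acc = acc := by
  cases f <;> simp [pvWalk2]

theorem pvWalk2_acc (states : List (String × Int)) :
    ∀ (f : Nat) (i : Int) (acc : List String),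
      pvWalk2 states f i acc = pvWalk2 states f i [] ++ acc := by
  intro f
  induction f with
  | zero => intro i acc; simp [pvWalk2]
  | succ f ih =>
    intro i acc
    by_cases h : i = -1
    · simp [pvWalk2, h]
    · cases hg : PySem.List.pyGet? states i with
      | none => simp [pvWalk2, h, hg]
      | some pr =>
        obtain ⟨node, p⟩ := pr
        simp only [pvWalk2, h, if_false, hg]
        rw [ih p (node :: acc), ih p [node]]
        simp

theorem pvWalk2_stable (states t : List (String × Int)) (hInv : StInv states) :
    ∀ (f2 f1 : Nat) (i : Int) (acc : List String),
      (i = -1 ∨ (0 ≤ i ∧ i < (states.length : Int) ∧ i.toNat < f1 ∧ i.toNat < f2)) →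
      pvWalk2 (states ++ t) f1 i acc = pvWalk2 states f2 i acc := by
  intro f2
  induction f2 with
  | zero =>
    intro f1 i acc hc
    rcases hc with h | ⟨_, _, _, h⟩
    · subst h; rw [pvWalk2_neg_one, pvWalk2_neg_one]
    · omega
  | succ f2 ih =>
    intro f1 i acc hc
    rcases hc with h | ⟨h0, h1, hf1, hf2⟩
    · subst h; rw [pvWalk2_neg_one, pvWalk2_neg_one]
    · obtain ⟨k, rfl⟩ : ∃ k, f1 = k + 1 := ⟨f1 - 1, by omega⟩
      have hne : i ≠ -1 := by omega
      have hiN : i.toNat < states.length := by omega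
      have hget : PySem.List.pyGet? (states ++ t) i = some (states[i.toNat]'hiN) := by
        rw [pyGet?_pos _ _ h0 (by simp; omega), List.getElem?_append_left hiN,
          List.getElem?_eq_getElem hiN]
      have hget' : PySem.List.pyGet? states i = some (states[i.toNat]'hiN) := by
        rw [pyGet?_pos _ _ h0 h1, List.getElem?_eq_getElem hiN]
      have hp := hInv i.toNat hiN
      simp only [pvWalk2, hne, if_false, hget, hget']
      exact ih k (states[i.toNat]'hiN).2 _ (by omega)

-- path of the freshly appended state = parent's path plus its node
theorem pathOf_new (states : List (String × Int)) (hInv : StInv states) (n : String) (si : Int)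
    (hsi : GoodIdx states si) :
    pathOf (states ++ [(n, si)]) ((states.length : Int)) = pathOf states si ++ [n] := by
  obtain ⟨h0, h1⟩ := hsi
  unfold pathOf
  have hlen : (states ++ [(n, si)]).length = states.length + 1 := by simp
  rw [hlen]
  have hne : (states.length : Int) ≠ -1 := by omega
  have hget : PySem.List.pyGet? (states ++ [(n, si)]) (states.length : Int) = some (n, si) := by
    rw [pyGet?_pos _ _ (by omega) (by simp), Int.toNat_natCast]
    simp
  simp only [pvWalk2, hne, if_false, hget]
  rw [pvWalk2_acc]
  rw [pvWalk2_stable states [(n, si)] hInv states.length states.length si [] (by omega)]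

theorem pathOf_stable (states t : List (String × Int)) (hInv : StInv states) (i : Int)
    (hi : GoodIdx states i) : pathOf (states ++ t) i = pathOf states i := by
  unfold pathOf
  obtain ⟨h0, h1⟩ := hi
  exact pvWalk2_stable states t hInv states.length (states ++ t).length i []
    (Or.inr ⟨h0, h1, by simp; omega, by omega⟩)

theorem StInv_append (states : List (String × Int)) (hInv : StInv states) (n : String) (si : Int)
    (hsi : GoodIdx states si) : StInv (states ++ [(n, si)]) := by
  intro j h
  rcases lt_or_ge j states.length with hj | hj
  · have : (states ++ [(n, si)])[j]'h = states[j]'hj := by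
      simp [List.getElem_append_left hj]
    rw [this]; exact hInv j hj
  · have hj' : j = states.length := by simp at h; omega
    subst hj'
    have : (states ++ [(n, si)])[states.length]'h = (n, si) := by
      simp
    rw [this]
    obtain ⟨h0, h1⟩ := hsi
    constructor <;> simp <;> omega

theorem mapQ_append_states (states t : List (String × Int)) (hInv : StInv states)
    (qB : List (Int × String × Int × Int)) (hG : ∀ e ∈ qB, GoodIdx states e.2.2.1) :
    mapQ (states ++ t) qB = mapQ states qB := by
  unfold mapQ
  apply List.map_congr_left
  intro e he
  rw [pathOf_stable states t hInv e.2.2.1 (hG e he)]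

-- one neighbor pass: A's fold over the path-carrying queue tracks B's pvExpand,
-- which appends to the back stack and the state table only
theorem expand_rel (locs : List (String × List Int)) (eL cost momentum : Int) (current : String)
    (si : Int) (path : List String) (fr : List (Int × String × Int × Int)) :
    ∀ (ns : List String) (back : List (Int × String × Int × Int))
      (states : List (String × Int)) (visited : PySem.Set (String × String)),
      StInv states → GoodIdx states si →
      (∀ e ∈ fr ++ back, GoodIdx states e.2.2.1) →
      pathOf states si = path →
      (ns.foldl (fun acc neighbor =>
          let required := pvLoc2 locs neighbor - pvLoc2 locs current
          if eL + momentum ≥ required then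
            if PySem.Set.contains acc.2 (current, neighbor) then acc
            else (acc.1 ++ [(cost + 1, neighbor, path ++ [neighbor], max (-required) 0)],
                  PySem.Set.add acc.2 (current, neighbor))
          else acc) (mapQ states (fr ++ back), visited)
        = ((fun r => (mapQ r.2.1 (fr ++ r.1), r.2.2))
            (pvExpand locs eL cost momentum current si ns back states visited)))
      ∧ (∃ u, (pvExpand locs eL cost momentum current si ns back states visited).2.1 = states ++ u)
      ∧ StInv (pvExpand locs eL cost momentum current si ns back states visited).2.1
      ∧ (∀ e ∈ fr ++ (pvExpand locs eL cost momentum current si ns back states visited).1,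
            GoodIdx (pvExpand locs eL cost momentum current si ns back states visited).2.1 e.2.2.1) := by
  intro ns
  induction ns with
  | nil =>
    intro back states visited hInv hsi hG hpath
    refine ⟨by simp [pvExpand], ⟨[], by simp [pvExpand]⟩, ?_, ?_⟩
    · simpa [pvExpand] using hInv
    · simpa [pvExpand] using hG
  | cons n rest ih =>
    intro back states visited hInv hsi hG hpath
    simp only [List.foldl_cons, pvExpand]
    set req := pvLoc2 locs n - pvLoc2 locs current with hreq
    by_cases hc : eL + momentum ≥ req ∧ PySem.Set.contains visited (current, n) = false
    · obtain ⟨hE, hM⟩ := hc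
      simp only [hE, and_self, if_true, hM, Bool.false_eq_true, if_false]
      set states2 := states ++ [(n, si)] with hs2
      set back2 := back ++ [(cost + 1, n, (states.length : Int), max (-req) 0)] with hb2
      set vis2 := PySem.Set.add visited (current, n) with hv2
      have hInv2 : StInv states2 := StInv_append states hInv n si hsi
      have hsi2 : GoodIdx states2 si := by
        obtain ⟨h0, h1⟩ := hsi; exact ⟨h0, by simp [hs2]; omega⟩
      have hG2 : ∀ e ∈ fr ++ back2, GoodIdx states2 e.2.2.1 := by
        intro e he
        rcases List.mem_append.mp he with h | h
        · obtain ⟨h0, h1⟩ := hG e (List.mem_append.mpr (Or.inl h))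
          exact ⟨h0, by simp [hs2]; omega⟩
        · rcases List.mem_append.mp h with h | h
          · obtain ⟨h0, h1⟩ := hG e (List.mem_append.mpr (Or.inr h))
            exact ⟨h0, by simp [hs2]; omega⟩
          · simp at h; subst h
            constructor <;>
              · simp only [hs2, List.length_append, List.length_cons, List.length_nil]
                omega
      have hpath2 : pathOf states2 si = path := by
        rw [hs2, pathOf_stable states [(n, si)] hInv si hsi]; exact hpath
      have hmapnew : mapQ states2 (fr ++ back2) =
          mapQ states (fr ++ back) ++ [(cost + 1, n, path ++ [n], max (-req) 0)] := by
        rw [hb2, show fr ++ (back ++ [(cost + 1, n, (states.length : Int), max (-req) 0)]) =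
          (fr ++ back) ++ [(cost + 1, n, (states.length : Int), max (-req) 0)] by simp]
        unfold mapQ
        rw [List.map_append]
        congr 1
        · exact mapQ_append_states states [(n, si)] hInv (fr ++ back) hG
        · simp only [List.map_cons, List.map_nil]
          rw [hs2]
          rw [pathOf_new states hInv n si hsi, hpath]
      have key := ih back2 states2 vis2 hInv2 hsi2 hG2 hpath2
      obtain ⟨k1, ⟨u, hu⟩, k3, k4⟩ := key
      refine ⟨?_, ⟨(n, si) :: u, by rw [hu, hs2]; simp⟩, k3, k4⟩
      rw [← hmapnew]
      exact k1
    · simp only [hc, if_false]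
      have hstep : (if eL + momentum ≥ req then
            if PySem.Set.contains visited (current, n) = true then (mapQ states (fr ++ back), visited)
            else (mapQ states (fr ++ back) ++ [(cost + 1, n, path ++ [n], max (-req) 0)],
                  PySem.Set.add visited (current, n))
          else (mapQ states (fr ++ back), visited)) = (mapQ states (fr ++ back), visited) := by
        by_cases hE : eL + momentum ≥ req
        · have hM : PySem.Set.contains visited (current, n) = true := by
            by_contra h
            exact hc ⟨hE, by simpa using h⟩
          rw [if_pos hE, if_pos hM]
        · rw [if_neg hE]
      rw [hstep]
      exact ih back states visited hInv hsi hG hpath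

-- normalizing the two-stack queue at the top of an iteration changes nothing
theorem loopB_norm (locs : List (String × List Int)) (paths : List (String × List String))
    (eL : Int) (fuel : Nat) (front back : List (Int × String × Int × Int))
    (states : List (String × Int)) (visited : PySem.Set (String × String)) :
    bfsLoopB locs paths eL (fuel + 1) front back states visited =
      bfsLoopB locs paths eL (fuel + 1) (if front.isEmpty then back.reverse else front)
        (if front.isEmpty then [] else back) states visited := by
  cases front with
  | cons a l => simp [bfsLoopB]
  | nil =>
    cases hb : back.reverse with
    | nil =>
      have hbe : back = [] := by simpa using congrArg List.reverse hb
      subst hbe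
      simp [bfsLoopB]
    | cons b bs => simp [bfsLoopB, hb]

-- the two loops agree whenever A's queue denotes B's (front, back, states)
theorem loop_rel (locs : List (String × List Int)) (paths : List (String × List String)) (eL : Int) :
    ∀ (fuel : Nat) (front back : List (Int × String × Int × Int)) (states : List (String × Int))
      (visited : PySem.Set (String × String)),
      StInv states → (∀ e ∈ front.reverse ++ back, GoodIdx states e.2.2.1) →
      bfsLoopA locs paths eL fuel (mapQ states (front.reverse ++ back)) visited =
        bfsLoopB locs paths eL fuel front back states visited := by
  intro fuel
  induction fuel with
  | zero => intro front back states visited _ _; rfl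
  | succ fuel ih =>
    intro front back states visited hInv hG
    rw [loopB_norm]
    set f1 := if front.isEmpty then back.reverse else front with hf1
    set b1 := if front.isEmpty then ([] : List (Int × String × Int × Int)) else back with hb1
    have hqeq : f1.reverse ++ b1 = front.reverse ++ back := by
      by_cases h : front.isEmpty
      · have : front = [] := by simpa using h
        simp [hf1, hb1, this]
      · simp [hf1, hb1, h]
    have hG1 : ∀ e ∈ f1.reverse ++ b1, GoodIdx states e.2.2.1 := by
      rw [hqeq]; exact hG
    rw [← hqeq]
    rcases List.eq_nil_or_concat f1 with hnil | ⟨f1', e, hcat⟩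
    · have hb1nil : b1 = [] := by
        by_cases h : front.isEmpty
        · simp [hb1, h]
        · exfalso; rw [hf1] at hnil; simp [h] at hnil
          have : front.isEmpty := by simp [hnil]
          exact absurd this (by simpa using h)
      rw [hnil, hb1nil]
      simp [bfsLoopB, mapQ, bfsLoopA]
    · obtain ⟨cost, current, si, momentum⟩ := e
      have hne : ¬ f1.isEmpty := by rw [hcat]; simp
      have hlast : f1.getLast? = some (cost, current, si, momentum) := by
        rw [hcat]; simp
      have hdrop : f1.dropLast = f1' := by rw [hcat]; simp
      have hrev : f1.reverse ++ b1 = (cost, current, si, momentum) :: (f1'.reverse ++ b1) := by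
        rw [hcat]; simp
      -- reduce B one step
      have hfe : f1.isEmpty = false := by rw [hcat]; simp
      conv_rhs => rw [bfsLoopB]
      simp only [hfe, Bool.false_eq_true, if_false, hlast, hdrop]
      rw [hrev]
      simp only [mapQ, List.map_cons]
      by_cases hgoal : current = "goal"
      · simp only [bfsLoopA, hgoal, if_true, pathOf]
      · simp only [bfsLoopA, hgoal, if_false]
        have hsi : GoodIdx states si := by
          have := hG1 (cost, current, si, momentum) (by rw [hrev]; exact List.mem_cons_self)
          exact this
        have hGrest : ∀ x ∈ f1'.reverse ++ b1, GoodIdx states x.2.2.1 := by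
          intro x hx
          exact hG1 x (by rw [hrev]; exact List.mem_cons_of_mem _ hx)
        have key := expand_rel locs eL cost momentum current si (pathOf states si)
          f1'.reverse ((pvLookup paths current).getD []) b1 states visited hInv hsi hGrest rfl
        obtain ⟨k1, ⟨u, hu⟩, k3, k4⟩ := key
        rw [show (List.map (fun e => (e.1, e.2.1, pathOf states e.2.2.1, e.2.2.2))
          (f1'.reverse ++ b1)) = mapQ states (f1'.reverse ++ b1) from rfl]
        rw [k1]
        dsimp only
        exact ih f1' _ _ _ k3 k4

-- ===== VERDICT (by name: the statement is the Claim_ definition above) =====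
theorem bfs_spec : Claim_equal_bfs := by
  intro safeLocations safePaths energyLimit _ _
  unfold Spec_bfs bfs bfs_alt
  have h1 : StInv [("start", -1)] := by
    intro j h
    have : j = 0 := by simp at h; omega
    subst this
    simp
  have h2 : ∀ e ∈ ([((0:Int), "start", (0:Int), (0:Int))].reverse ++ []),
      GoodIdx [("start", (-1:Int))] e.2.2.1 := by
    intro e he
    simp at he
    rw [he]
    exact ⟨le_refl 0, by simp⟩
  have key := loop_rel safeLocations safePaths energyLimit (pvFuel safePaths)
    [(0, "start", 0, 0)] [] [("start", -1)] PySem.Set.empty h1 h2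
  have hq : mapQ [("start", -1)] ([((0:Int), "start", (0:Int), (0:Int))].reverse ++ []) =
      [((0:Int), "start", ["start"], (0:Int))] := by decide
  rw [hq] at key
  exact key
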